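-- pv_equiv track=rewrite | github.com/pypi-data/pypi-mirror-385 | packages/reflexive/reflexive-2.2.2.tar.gz/reflexive-2.2.2/.history/src/reflexive/analysis_functions_20251021145809.py | zero_pos
-- ===== SOURCE A (Python) =====
-- def zero_pos(am):
--     nm = []
--     for r,row in enumerate(am):
--         nr = []
--         for c,weight in enumerate(row):
--             if r < 3 or c < 3:
--                 nr.append(weight)
--             else:
--                 nr.append(0)
--         nm.append(nr)
--     return nm
-- ===== SOURCE B (Python) =====
-- def zero_pos(am):
--     kept = [row[:] for row in am[:3]]
--     zeroed = [row[:3] + [0] * (len(row) - 3) for row in am[3:]]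
--     return kept + zeroed
-- ===== Notes on version B (the rewrite author's own statement) =====
-- stated objective: simpler
-- what changed: Replaces the fused per-cell enumerate/conditional loops with a slice-based decomposition: keep the first three rows verbatim and rebuild every later row as row[:3] plus a block of zeros, so no index comparison is performed per cell.
import Mathlib
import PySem

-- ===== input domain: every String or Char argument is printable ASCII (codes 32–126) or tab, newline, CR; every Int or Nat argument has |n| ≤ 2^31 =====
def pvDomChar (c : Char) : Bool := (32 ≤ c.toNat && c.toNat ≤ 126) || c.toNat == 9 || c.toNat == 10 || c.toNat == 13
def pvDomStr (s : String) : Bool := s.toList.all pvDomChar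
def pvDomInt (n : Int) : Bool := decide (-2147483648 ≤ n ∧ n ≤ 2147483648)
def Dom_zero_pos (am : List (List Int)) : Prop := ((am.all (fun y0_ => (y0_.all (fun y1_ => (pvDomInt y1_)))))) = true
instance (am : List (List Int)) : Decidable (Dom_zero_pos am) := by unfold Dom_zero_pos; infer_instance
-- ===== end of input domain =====

-- B replaces the per-cell conditional with a slice decomposition (first 3 rows kept, later
-- rows rebuilt as row[:3] ++ zeros); objective: simpler. Neither version mutates its argument.

-- ===== PORT A =====
def zero_pos (am : List (List Int)) : List (List Int) :=
  (PySem.List.enumerate am 0).foldl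
    (fun nm p =>
      nm ++ [ (PySem.List.enumerate p.2 0).foldl
                (fun nr q => nr ++ [ if p.1 < 3 ∨ q.1 < 3 then q.2 else 0 ]) [] ]) []

-- ===== PORT B =====
-- [0] * (len(row) - 3): Python's negative repeat count yields []; Nat subtraction clamps to 0 the same way.
def zero_pos_alt (am : List (List Int)) : List (List Int) :=
  (PySem.List.slice am none (some 3)).map (fun row => PySem.List.slice row none none)
  ++ (PySem.List.slice am (some 3) none).map
       (fun row => PySem.List.slice row none (some 3) ++ List.replicate (row.length - 3) 0)

-- ===== PRECONDITION & SPEC =====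
def Spec_zero_pos (am : List (List Int)) (out : List (List Int)) : Prop := out = zero_pos_alt am
instance (am : List (List Int)) (out : List (List Int)) : Decidable (Spec_zero_pos am out) := by unfold Spec_zero_pos; infer_instance

-- ===== CLAIM (what is proved, stated in full; the proofs are below) =====
def Claim_equal_zero_pos : Prop := ∀ (am : List (List Int)), Dom_zero_pos am → Spec_zero_pos am (zero_pos am)

-- ===== LEMMAS AND PROOFS =====

-- a zeroed row of A, started at enumerate index s ≥ 3's complement
theorem inner_zero (row : List Int) (s : Int) (hs : 0 ≤ s) :
    (PySem.List.enumerate row s).map (fun q => if q.1 < 3 then q.2 else 0)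
      = row.take (3 - s).toNat ++ List.replicate (row.length - (3 - s).toNat) 0 := by
  induction row generalizing s with
  | nil => simp [PySem.List.enumerate_nil]
  | cons x xs ih =>
    rw [PySem.List.enumerate_cons, List.map_cons, ih (s + 1) (by omega)]
    by_cases h : s < 3
    · have h1 : (3 - s).toNat = (3 - (s + 1)).toNat + 1 := by omega
      simp [h, h1, List.take_succ_cons]
    · have h1 : (3 - s).toNat = 0 := by omega
      have h2 : (3 - (s + 1)).toNat = 0 := by omega
      simp [h, h1, h2, List.replicate_succ]

-- a kept row of A: the condition is always true
theorem inner_keep (row : List Int) (s : Int) :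
    (PySem.List.enumerate row s).map (fun q => (q.2 : Int)) = row :=
  PySem.List.map_snd_enumerate row s

theorem outer (am : List (List Int)) (s : Int) (hs : 0 ≤ s) :
    (PySem.List.enumerate am s).map
        (fun p => (PySem.List.enumerate p.2 0).map
          (fun q => if p.1 < 3 ∨ q.1 < 3 then q.2 else 0))
      = am.take (3 - s).toNat
        ++ (am.drop (3 - s).toNat).map
             (fun row => row.take 3 ++ List.replicate (row.length - 3) 0) := by
  induction am generalizing s with
  | nil => simp [PySem.List.enumerate_nil]
  | cons row xs ih =>
    rw [PySem.List.enumerate_cons, List.map_cons, ih (s + 1) (by omega)]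
    by_cases h : s < 3
    · have h1 : (3 - s).toNat = (3 - (s + 1)).toNat + 1 := by omega
      have hk : (PySem.List.enumerate row 0).map
          (fun q => if s < 3 ∨ q.1 < 3 then q.2 else 0) = row := by
        have := inner_keep row 0
        simpa [h] using this
      simp [h1, List.take_succ_cons, hk]
    · have h1 : (3 - s).toNat = 0 := by omega
      have h2 : (3 - (s + 1)).toNat = 0 := by omega
      have hz : (PySem.List.enumerate row 0).map
          (fun q => if s < 3 ∨ q.1 < 3 then q.2 else 0)
          = row.take 3 ++ List.replicate (row.length - 3) 0 := by
        have := inner_zero row 0 (by omega)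
        simpa [h] using this
      simp [h1, h2, hz]

theorem zero_pos_eq_map (am : List (List Int)) :
    zero_pos am = (PySem.List.enumerate am 0).map
        (fun p => (PySem.List.enumerate p.2 0).map
          (fun q => if p.1 < 3 ∨ q.1 < 3 then q.2 else 0)) := by
  unfold zero_pos
  rw [PySem.List.foldl_append_singleton_eq_map]
  refine List.map_congr_left (fun p _ => ?_)
  rw [PySem.List.foldl_append_singleton_eq_map]
  simp

-- ===== VERDICT (by name: the statement is the Claim_ definition above) =====
theorem zero_pos_spec : Claim_equal_zero_pos := by
  intro am _
  show zero_pos am = zero_pos_alt am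
  rw [zero_pos_eq_map, outer am 0 le_rfl]
  unfold zero_pos_alt
  simp [pysem]
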